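-- pv_equiv track=rewrite | github.com/Albertree/SOAR-ARC-test | procedural_memory/base_rules/_primitives.py | unique_colors
-- ===== SOURCE A (Python) =====
-- def find_bg_color(grid):
--     """Return the most frequent color (background)."""
--     counts = {}
--     for row in grid:
--         for c in row:
--             counts[c] = counts.get(c, 0) + 1
--     return max(counts, key=counts.get) if counts else 0
--
-- def unique_colors(grid, exclude_bg=True):
--     """Return sorted list of unique colors in grid. Optionally exclude background."""
--     bg = find_bg_color(grid) if exclude_bg else None
--     colors = set()
--     for row in grid:
--         for c in row:
--             if c != bg:
--                 colors.add(c)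
--     return sorted(colors)
-- ===== SOURCE B (Python) =====
-- def unique_colors(grid, exclude_bg=True):
--     """Return sorted list of unique colors in grid. Optionally exclude background."""
--     counts = {}
--     for row in grid:
--         for c in row:
--             counts[c] = counts.get(c, 0) + 1
--     if exclude_bg:
--         bg = max(counts, key=counts.get) if counts else 0
--     else:
--         bg = None
--     return sorted(color for color in counts if color != bg)
-- ===== Notes on version B (the rewrite author's own statement) =====
-- stated objective: alternative
-- what changed: B builds one count dictionary in a single pass over the grid and derives both the background (first-maximal key) and the output colours from that dictionary's keys, instead of A's helper-then-second-full-grid-scan-into-a-set decomposition; measured cost is the same.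
import Mathlib
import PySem

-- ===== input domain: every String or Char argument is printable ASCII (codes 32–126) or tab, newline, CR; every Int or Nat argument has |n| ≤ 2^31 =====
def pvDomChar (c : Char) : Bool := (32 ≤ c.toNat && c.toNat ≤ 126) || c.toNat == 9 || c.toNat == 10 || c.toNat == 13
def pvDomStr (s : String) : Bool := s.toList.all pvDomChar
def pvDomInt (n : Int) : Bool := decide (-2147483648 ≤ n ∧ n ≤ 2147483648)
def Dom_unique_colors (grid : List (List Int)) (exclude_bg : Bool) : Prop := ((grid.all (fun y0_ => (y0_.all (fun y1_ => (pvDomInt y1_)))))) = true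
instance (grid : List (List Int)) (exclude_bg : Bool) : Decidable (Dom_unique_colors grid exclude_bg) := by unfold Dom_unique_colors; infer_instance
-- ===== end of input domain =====

-- B folds the grid once into a count dict and sorts its filtered keys instead of rescanning the grid into a set (alternative decomposition, same cost).

-- ===== PORT A =====
def find_bg_color (grid : List (List Int)) : Int :=
  let counts : PySem.Dict Int Int :=
    grid.foldl (fun d row => row.foldl (fun d c => d.insert c (d.getD c 0 + 1)) d) PySem.Dict.empty
  match PySem.List.max? counts.keys (fun k => counts.getD k 0) with
  | some m => m
  | none => 0

def unique_colors (grid : List (List Int)) (exclude_bg : Bool) : List Int :=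
  let bg : Option Int := if exclude_bg then some (find_bg_color grid) else none
  let colors : PySem.Set Int :=
    grid.foldl (fun s row => row.foldl (fun s c => if some c ≠ bg then PySem.Set.add s c else s) s) PySem.Set.empty
  PySem.List.sorted colors (fun x => x) false

-- ===== PORT B =====
def unique_colors_alt (grid : List (List Int)) (exclude_bg : Bool) : List Int :=
  let counts : PySem.Dict Int Int :=
    grid.foldl (fun d row => row.foldl (fun d c => d.insert c (d.getD c 0 + 1)) d) PySem.Dict.empty
  let bg : Option Int :=
    if exclude_bg then
      some (match PySem.List.max? counts.keys (fun k => counts.getD k 0) with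
            | some m => m | none => 0)
    else none
  PySem.List.sorted (counts.keys.filter (fun k => decide (some k ≠ bg))) (fun x => x) false

-- ===== PRECONDITION & SPEC =====
def Spec_unique_colors (grid : List (List Int)) (exclude_bg : Bool) (out : List Int) : Prop := out = unique_colors_alt grid exclude_bg
instance (grid : List (List Int)) (exclude_bg : Bool) (out : List Int) : Decidable (Spec_unique_colors grid exclude_bg out) := by unfold Spec_unique_colors; infer_instance

-- ===== CLAIM (what is proved, stated in full; the proofs are below) =====
def Claim_equal_unique_colors : Prop := ∀ (grid : List (List Int)) (exclude_bg : Bool), Dom_unique_colors grid exclude_bg → Spec_unique_colors grid exclude_bg (unique_colors grid exclude_bg)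

-- ===== LEMMAS AND PROOFS =====

-- the nested count fold's key set is the ordered dedup of the flattened grid
lemma keys_count_fold_gen (grid : List (List Int)) (d : PySem.Dict Int Int) :
    (grid.foldl (fun d row => row.foldl (fun d c => d.insert c (d.getD c 0 + 1)) d) d).keys
      = PySem.Set.update d.keys grid.flatten := by
  induction grid generalizing d with
  | nil => simp [PySem.Set.update]
  | cons row rest ih =>
      simp only [List.foldl_cons, List.flatten_cons]
      rw [ih, PySem.Dict.keys_foldl_insert_key (key := fun c => c)]
      simp [PySem.Set.update, List.foldl_append]

lemma keys_count_fold (grid : List (List Int)) :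
    (grid.foldl (fun d row => row.foldl (fun d c => d.insert c (d.getD c 0 + 1)) d)
      (PySem.Dict.empty : PySem.Dict Int Int)).keys = PySem.Set.ofList grid.flatten := by
  rw [keys_count_fold_gen]
  simp [PySem.Set.update, PySem.Set.ofList_eq_foldl, PySem.Dict.empty]

-- one row of the conditional Set fold adds exactly the row's filtered elements
lemma row_fold_filter (row : List Int) (p : Int → Prop) [DecidablePred p] (s : PySem.Set Int) :
    row.foldl (fun s c => if p c then PySem.Set.add s c else s) s
      = PySem.Set.update s (row.filter (fun c => decide (p c))) := by
  induction row generalizing s with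
  | nil => simp [PySem.Set.update]
  | cons c t ih =>
      by_cases h : p c <;> simp [h, ih, PySem.Set.update]

-- the conditional Set fold collects exactly the filtered flattened grid
lemma set_fold_filter (grid : List (List Int)) (p : Int → Prop) [DecidablePred p] :
    (grid.foldl (fun s row => row.foldl (fun s c => if p c then PySem.Set.add s c else s) s)
      (PySem.Set.empty : PySem.Set Int)) = PySem.Set.ofList (grid.flatten.filter (fun c => decide (p c))) := by
  suffices h : ∀ s, (grid.foldl (fun s row => row.foldl (fun s c => if p c then PySem.Set.add s c else s) s) s)
      = PySem.Set.update s (grid.flatten.filter (fun c => decide (p c))) by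
    rw [h]; simp [PySem.Set.update, PySem.Set.ofList_eq_foldl, PySem.Set.empty]
  induction grid with
  | nil => intro s; simp [PySem.Set.update]
  | cons row rest ih =>
      intro s
      simp only [List.foldl_cons, List.flatten_cons, List.filter_append]
      rw [row_fold_filter, ih]
      simp [PySem.Set.update, List.foldl_append]

-- ===== VERDICT (by name: the statement is the Claim_ definition above) =====
theorem unique_colors_spec : Claim_equal_unique_colors := by
  intro grid exclude_bg _
  unfold Spec_unique_colors unique_colors unique_colors_alt find_bg_color
  simp only []
  rw [set_fold_filter _ (fun c => some c ≠ _), keys_count_fold]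
  apply PySem.List.sorted_eq_sorted_of_perm _ _ _ (fun a b h => h)
  rw [List.perm_ext_iff_of_nodup]
  · intro a
    simp [PySem.Set.mem_ofList, List.mem_filter]
    constructor
    · rintro ⟨l, hl, ha, hp⟩; exact ⟨⟨l, hl, ha⟩, hp⟩
    · rintro ⟨⟨l, hl, ha⟩, hp⟩; exact ⟨l, hl, ha, hp⟩
  · exact (PySem.Set.nodup_ofList _)
  · exact (PySem.Set.nodup_ofList _).filter _
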